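-- pv_equiv track=rewrite | github.com/tsani/coding-cat-public | Neighbouring_Repeats/solution.py | neighbour_repeat
-- ===== SOURCE A (Python) =====
-- def neighbour_repeat(word: str) -> str:
--     new_word = ""
--     if len(word) == 1:
--         return word
--     elif len(word) == 2:
--         if word[0] == word[1]:
--             return new_word
--         return word
--     for i in range(1, len(word)-1):
--         if word[i] != word[i-1] and word[i] != word[i+1]:
--             new_word += word[i]
--     if len(word) > 2:
--         if word[-1] != word[-2]:
--             new_word += word[-1]
--         if word[0] != word[1]:
--             return word[0] + new_word
--     return new_word
-- ===== SOURCE B (Python) =====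
-- def neighbour_repeat(word: str) -> str:
--     # Run-length scan: a character survives iff its maximal run of equal
--     # consecutive characters has length exactly 1.
--     out = []
--     i = 0
--     n = len(word)
--     while i < n:
--         j = i + 1
--         while j < n and word[j] == word[i]:
--             j += 1
--         if j - i == 1:
--             out.append(word[i])
--         i = j
--     return "".join(out)
-- ===== Notes on version B (the rewrite author's own statement) =====
-- stated objective: idiomatic
-- what changed: A's index-based scan with separate special cases for length 1, length 2, the first, middle and last characters is replaced by a single uniform run-length scan that keeps exactly the characters forming a maximal run of length 1.
import Mathlib
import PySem

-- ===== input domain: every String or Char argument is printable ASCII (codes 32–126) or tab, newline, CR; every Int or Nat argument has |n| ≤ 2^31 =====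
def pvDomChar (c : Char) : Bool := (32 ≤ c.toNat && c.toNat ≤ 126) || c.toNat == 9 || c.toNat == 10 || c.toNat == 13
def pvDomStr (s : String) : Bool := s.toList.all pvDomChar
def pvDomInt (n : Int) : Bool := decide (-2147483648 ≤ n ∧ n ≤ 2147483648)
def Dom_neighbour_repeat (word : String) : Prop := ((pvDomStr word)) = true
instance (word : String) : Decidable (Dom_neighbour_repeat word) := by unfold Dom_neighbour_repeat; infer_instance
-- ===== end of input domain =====

-- B replaces A's index-based three-way neighbour test (with separate first/last/middle
-- handling) by a single run-length scan keeping exactly the singleton runs (idiomatic).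

-- ===== PORT A =====
def neighbour_repeat (word : String) : String :=
  let cs := word.toList
  let n : Int := PySem.List.len cs
  if n = 1 then word
  else if n = 2 then
    if PySem.List.pyGet? cs 0 = PySem.List.pyGet? cs 1 then "" else word
  else
    -- for i in range(1, len(word)-1): if word[i] != word[i-1] and word[i] != word[i+1]: new_word += word[i]
    let new_word : List Char :=
      (PySem.List.pyRange 1 (n - 1) 1).foldl
        (fun acc i =>
          if PySem.List.pyGet? cs i ≠ PySem.List.pyGet? cs (i - 1) ∧
             PySem.List.pyGet? cs i ≠ PySem.List.pyGet? cs (i + 1)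
          then acc ++ (PySem.List.pyGet? cs i).toList else acc) []
    -- if len(word) > 2: …
    let new_word :=
      if 2 < n then
        if PySem.List.pyGet? cs (-1) ≠ PySem.List.pyGet? cs (-2)
        then new_word ++ (PySem.List.pyGet? cs (-1)).toList else new_word
      else new_word
    if 2 < n ∧ PySem.List.pyGet? cs 0 ≠ PySem.List.pyGet? cs 1
    then String.ofList ((PySem.List.pyGet? cs 0).toList ++ new_word)
    else String.ofList new_word

-- ===== PORT B =====
-- run-length scan: keep the head of each maximal run of equal characters iff the run
-- has no second element (run length exactly 1)
def nrGo : List Char → List Char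
  | [] => []
  | c :: rest =>
    let run := rest.takeWhile (fun d => d == c)
    let tail := rest.dropWhile (fun d => d == c)
    (if run.isEmpty then [c] else []) ++ nrGo tail
termination_by cs => cs.length
decreasing_by
  have := List.length_dropWhile_le (fun d => d == c) rest
  simp; omega

def neighbour_repeat_alt (word : String) : String :=
  String.ofList (nrGo word.toList)

-- ===== PRECONDITION & SPEC =====
def Spec_neighbour_repeat (word : String) (out : String) : Prop := out = neighbour_repeat_alt word
instance (word : String) (out : String) : Decidable (Spec_neighbour_repeat word out) := by unfold Spec_neighbour_repeat; infer_instance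

-- ===== CLAIM (what is proved, stated in full; the proofs are below) =====
def Claim_equal_neighbour_repeat : Prop := ∀ (word : String), Dom_neighbour_repeat word → Spec_neighbour_repeat word (neighbour_repeat word)

-- ===== LEMMAS AND PROOFS =====

-- structural middle ground: one character at a time, carrying the previous character
def sg : Option Char → List Char → List Char
  | p, [c] => if some c ≠ p then [c] else []
  | p, c :: d :: rest => (if some c ≠ p ∧ c ≠ d then [c] else []) ++ sg (some c) (d :: rest)
  | _, [] => []

-- the middle characters A's loop keeps, structurally
def mids : List Char → List Char
  | a :: b :: c :: r => (if b ≠ a ∧ b ≠ c then [b] else []) ++ mids (b :: c :: r)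
  | _ => []

-- A's trailing "if word[-1] != word[-2]" contribution, structurally
def lp2 : Char → Char → List Char → List Char
  | a, b, [] => if b ≠ a then [b] else []
  | _, b, c :: r => lp2 b c r

theorem sg_skip (c : Char) (cs : List Char) : sg (some c) (c :: cs) = sg (some c) cs := by
  cases cs with
  | nil => simp [sg]
  | cons d r => simp [sg]

theorem sg_indep (p q : Option Char) (d : Char) (r : List Char)
    (hp : some d ≠ p) (hq : some d ≠ q) : sg p (d :: r) = sg q (d :: r) := by
  cases r with
  | nil => simp [sg, hp, hq]
  | cons e r' => simp [sg, hp, hq]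

theorem sg_run (c : Char) (run tail : List Char)
    (hr : ∀ x ∈ run, x = c) (ht : ∀ d, tail.head? = some d → d ≠ c) :
    sg (some c) (run ++ tail) = sg none tail := by
  induction run with
  | nil =>
    simp only [List.nil_append]
    cases tail with
    | nil => simp [sg]
    | cons d r =>
      exact sg_indep _ _ d r (by simpa using (ht d rfl)) (by simp)
  | cons x run' ih =>
    have hx : x = c := hr x (by simp)
    subst hx
    rw [List.cons_append, sg_skip]
    exact ih (fun y hy => hr y (by simp [hy]))

theorem nrGo_eq_sg_fuel : ∀ (n : Nat) (cs : List Char), cs.length ≤ n → nrGo cs = sg none cs := by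
  intro n
  induction n with
  | zero => intro cs h; simp at h; simp [h, nrGo, sg]
  | succ n ih =>
    intro cs h
    cases cs with
    | nil => simp [nrGo, sg]
    | cons c rest =>
      rw [nrGo]
      cases rest with
      | nil => simp [nrGo, sg]
      | cons d r =>
        by_cases hdc : d = c
        · subst hdc
          have htw : ¬ ((d :: r).takeWhile (fun x => x == d)).isEmpty = true := by
            simp
          simp only [htw]
          have hsg : sg none (d :: d :: r) = sg (some d) (d :: r) := by
            simp [sg]
          rw [hsg]
          have hsplit := List.takeWhile_append_dropWhile (p := fun x => x == d) (l := d :: r)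
          have hrun : sg (some d) (d :: r) = sg none ((d :: r).dropWhile (fun x => x == d)) := by
            conv_lhs => rw [← hsplit]
            apply sg_run
            · intro x hx
              have := List.mem_takeWhile_imp hx
              simpa using this
            · intro e he
              have h2 := List.head?_dropWhile_not (fun x => x == d) (d :: r)
              rw [he] at h2
              simpa using h2
          rw [hrun]
          have hlen : (r.dropWhile (fun x => x == d)).length ≤ n := by
            have h2 := List.length_dropWhile_le (fun x => x == d) r
            simp at h
            omega
          simp [ih _ hlen]
        · have htw : ((d :: r).takeWhile (fun x => x == c)).isEmpty = true := by
            simp [hdc]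
          have hdw : (d :: r).dropWhile (fun x => x == c) = d :: r := by
            simp [hdc]
          simp only [htw, if_true, hdw]
          have hB := ih (d :: r) (by simp at h ⊢; omega)
          rw [hB]
          have hsg1 : sg none (c :: d :: r) = [c] ++ sg (some c) (d :: r) := by
            simp [sg, Ne.symm hdc]
          rw [hsg1, sg_indep (some c) none d r (by simp [hdc]) (by simp)]

theorem nrGo_eq_sg (cs : List Char) : nrGo cs = sg none cs :=
  nrGo_eq_sg_fuel cs.length cs le_rfl

theorem sg_some_eq (a b : Char) (r : List Char) :
    sg (some a) (b :: r) = mids (a :: b :: r) ++ lp2 a b r := by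
  induction r generalizing a b with
  | nil => simp [sg, mids, lp2]
  | cons c r' ih =>
    show (if some b ≠ some a ∧ b ≠ c then [b] else []) ++ sg (some b) (c :: r')
        = ((if b ≠ a ∧ b ≠ c then [b] else []) ++ mids (b :: c :: r')) ++ lp2 b c r'
    rw [ih b c]
    simp [List.append_assoc]


-- A's loop body as a per-index chunk
def gA (cs : List Char) (i : Int) : List Char :=
  if PySem.List.pyGet? cs i ≠ PySem.List.pyGet? cs (i - 1) ∧
     PySem.List.pyGet? cs i ≠ PySem.List.pyGet? cs (i + 1)
  then (PySem.List.pyGet? cs i).toList else []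

theorem mids_short (cs : List Char) (h : cs.length < 3) : mids cs = [] := by
  cases cs with
  | nil => rfl
  | cons a t =>
    cases t with
    | nil => rfl
    | cons b t2 =>
      cases t2 with
      | nil => rfl
      | cons c t3 => simp at h; omega

theorem pyGet?_neg_cons (x : Char) (xs : List Char) (k : Int) (hk : k < 0) (h : -k ≤ xs.length) :
    PySem.List.pyGet? (x::xs) k = PySem.List.pyGet? xs k := by
  have hk' : ¬ (0 ≤ k) := by omega
  have h1 : -((xs.length + 1 : Nat) : Int) ≤ k := by push_cast; omega
  have h2 : -(xs.length : Int) ≤ k := by omega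
  simp only [PySem.List.pyGet?, PySem.List.pyIdx?, hk', if_false, h1, h2, if_true, List.length_cons,
    Option.bind]
  have h3 : xs.length + 1 - (-k).toNat = (xs.length - (-k).toNat) + 1 := by omega
  rw [h3, List.getElem?_cons_succ]

theorem lp2_py : ∀ (r : List Char) (a b : Char),
    lp2 a b r = if PySem.List.pyGet? (a::b::r) (-1) ≠ PySem.List.pyGet? (a::b::r) (-2)
                then (PySem.List.pyGet? (a::b::r) (-1)).toList else [] := by
  intro r
  induction r with
  | nil =>
    intro a b
    simp [lp2, PySem.List.pyGet?, PySem.List.pyIdx?]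
  | cons c r' ih =>
    intro a b
    rw [show lp2 a b (c::r') = lp2 b c r' from rfl, ih b c,
      pyGet?_neg_cons a (b::c::r') (-1) (by omega) (by simp only [List.length_cons]; omega),
      pyGet?_neg_cons a (b::c::r') (-2) (by omega) (by simp only [List.length_cons]; omega)]

theorem midx : ∀ (fuel : Nat) (cs : List Char) (k : Nat), cs.length ≤ k + fuel →
    (PySem.List.pyRange ((k:Int)+1) ((cs.length:Int) - 1)).flatMap (gA cs) = mids (cs.drop k) := by
  intro fuel
  induction fuel with
  | zero =>
    intro cs k h
    rw [PySem.List.pyRange_one_eq_nil (by omega),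
      mids_short _ (by simp [List.length_drop]; omega)]
    simp
  | succ fuel ih =>
    intro cs k h
    by_cases hlt : (k:Int)+1 < (cs.length:Int) - 1
    · have hk2 : k+2 < cs.length := by omega
      have hk1 : k+1 < cs.length := by omega
      have hk0 : k < cs.length := by omega
      rw [PySem.List.pyRange_one_cons hlt, List.flatMap_cons,
        show ((k:Int)+1)+1 = (((k+1:Nat)):Int)+1 by push_cast; ring,
        ih cs (k+1) (by omega)]
      have g1 : ((k:Int) + 1) = ((k+1 : Nat) : Int) := by push_cast; ring
      have g2 : (((k+1 : Nat) : Int) - 1) = ((k : Nat) : Int) := by push_cast; ring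
      have g3 : (((k+1 : Nat) : Int) + 1) = ((k+2 : Nat) : Int) := by push_cast; ring
      simp only [gA, g1, g2, g3, PySem.List.pyGet?_natCast]
      rw [List.getElem?_eq_getElem hk1, List.getElem?_eq_getElem hk0, List.getElem?_eq_getElem hk2,
        List.drop_eq_getElem_cons hk0, List.drop_eq_getElem_cons hk1, List.drop_eq_getElem_cons hk2,
        mids, ← List.drop_eq_getElem_cons hk2, ← List.drop_eq_getElem_cons hk1]
      simp
    · rw [PySem.List.pyRange_one_eq_nil (by omega),
        mids_short _ (by simp [List.length_drop]; omega)]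
      simp

theorem fold_eq_mids (cs : List Char) :
    (PySem.List.pyRange 1 ((cs.length:Int) - 1)).foldl
      (fun acc i =>
        if PySem.List.pyGet? cs i ≠ PySem.List.pyGet? cs (i - 1) ∧
           PySem.List.pyGet? cs i ≠ PySem.List.pyGet? cs (i + 1)
        then acc ++ (PySem.List.pyGet? cs i).toList else acc) []
    = mids cs := by
  have hb : (fun (acc : List Char) (i : Int) =>
      if PySem.List.pyGet? cs i ≠ PySem.List.pyGet? cs (i - 1) ∧
         PySem.List.pyGet? cs i ≠ PySem.List.pyGet? cs (i + 1)
      then acc ++ (PySem.List.pyGet? cs i).toList else acc)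
      = (fun acc i => acc ++ gA cs i) := by
    funext acc i
    simp only [gA]
    split <;> simp
  rw [hb, PySem.List.foldl_append_eq_flatMap, List.nil_append]
  have h0 := midx cs.length cs 0 (by omega)
  simpa using h0

theorem nr_eq_ofList (l : List Char) :
    neighbour_repeat (String.ofList l) = neighbour_repeat_alt (String.ofList l) := by
  unfold neighbour_repeat neighbour_repeat_alt
  simp only [String.toList_ofList, PySem.List.len_eq]
  rcases l with _ | ⟨a, _ | ⟨b, _ | ⟨c, r⟩⟩⟩
  · norm_num [nrGo, PySem.List.pyRange_one_eq_nil]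
  · norm_num [nrGo]
  · by_cases hab : a = b
    · subst hab
      norm_num [nrGo, PySem.List.pyGet?_ofNat, List.takeWhile_cons]
    · have hba : (b == a) = false := by simp [Ne.symm hab]
      norm_num [nrGo, List.takeWhile_cons, List.dropWhile_cons, hba, hab, Ne.symm hab]
  · have hlen : ((a :: b :: c :: r).length : Int) = (r.length : Int) + 3 := by simp; omega
    have h1 : ¬ ((a :: b :: c :: r).length : Int) = 1 := by rw [hlen]; omega
    have h2 : ¬ ((a :: b :: c :: r).length : Int) = 2 := by rw [hlen]; omega
    have h3 : (2 : Int) < ((a :: b :: c :: r).length : Int) := by rw [hlen]; omega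
    simp only [h1, h2, h3, if_false, if_true, true_and]
    rw [fold_eq_mids, nrGo_eq_sg]
    have hsg : sg none (a :: b :: c :: r)
        = (if a ≠ b then [a] else []) ++ (mids (a :: b :: c :: r) ++ lp2 a b (c :: r)) := by
      rw [show sg none (a :: b :: c :: r)
          = (if some a ≠ none ∧ a ≠ b then [a] else []) ++ sg (some a) (b :: c :: r) from rfl,
        sg_some_eq a b (c :: r)]
      simp
    rw [hsg, lp2_py (c :: r) a b]
    have hnn1 : (0:Int) ≤ (r.length:Int) + 1 := by positivity
    have hnn2 : (0:Int) ≤ (r.length:Int) + 1 + 1 := by positivity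
    have hg0 : PySem.List.pyGet? (a :: b :: c :: r) 0 = some a := by
      simp [PySem.List.pyGet?, PySem.List.pyIdx?, hnn2]
    have hg1 : PySem.List.pyGet? (a :: b :: c :: r) 1 = some b := by
      simp [PySem.List.pyGet?, PySem.List.pyIdx?, hnn1]
    rw [hg0, hg1]
    by_cases hab : a = b
    · subst hab
      by_cases hlast : PySem.List.pyGet? (a :: a :: c :: r) (-1)
          = PySem.List.pyGet? (a :: a :: c :: r) (-2) <;> simp [hlast]
    · by_cases hlast : PySem.List.pyGet? (a :: b :: c :: r) (-1)
          = PySem.List.pyGet? (a :: b :: c :: r) (-2) <;> simp [hab, hlast]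

-- ===== VERDICT (by name: the statement is the Claim_ definition above) =====
theorem neighbour_repeat_spec : Claim_equal_neighbour_repeat := by
  intro word _
  show neighbour_repeat word = neighbour_repeat_alt word
  have h := nr_eq_ofList word.toList
  rwa [String.ofList_toList] at h
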